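-- pv_equiv track=rewrite | github.com/NextStat/nextstat.io | bindings/ns-py/python/nextstat/formula.py | _tokenize_rhs
-- ===== SOURCE A (Python) =====
-- def _tokenize_rhs(rhs: str) -> list[str]:
--     # Tokenize by whitespace and +/-, keeping the operators.
--     tokens: list[str] = []
--     cur: list[str] = []
--     for ch in rhs:
--         if ch in "+-":
--             if cur:
--                 tok = "".join(cur).strip()
--                 if tok:
--                     tokens.append(tok)
--                 cur = []
--             tokens.append(ch)
--         else:
--             cur.append(ch)
--     if cur:
--         tok = "".join(cur).strip()
--         if tok:
--             tokens.append(tok)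
--     return [t for t in tokens if t]
-- ===== SOURCE B (Python) =====
-- def _tokenize_rhs(rhs: str) -> list[str]:
--     # Segment-jumping rewrite: consume the string one operator-delimited segment
--     # at a time by slicing, instead of accumulating characters one by one.
--     tokens: list[str] = []
--     rest = rhs
--     while rest:
--         stop = next((k for k, ch in enumerate(rest) if ch in "+-"), len(rest))
--         piece = rest[:stop].strip()
--         if piece:
--             tokens.append(piece)
--         if stop < len(rest):
--             tokens.append(rest[stop])
--         rest = rest[stop + 1:]
--     return tokens
-- ===== Notes on version B (the rewrite author's own statement) =====
-- stated objective: alternative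
-- what changed: Replaces A's fused char-by-char scan with a character accumulator by a segment-jumping loop that finds the next +/- operator and slices the whole segment out at once (and drops A's redundant final filter pass).
import Mathlib
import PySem

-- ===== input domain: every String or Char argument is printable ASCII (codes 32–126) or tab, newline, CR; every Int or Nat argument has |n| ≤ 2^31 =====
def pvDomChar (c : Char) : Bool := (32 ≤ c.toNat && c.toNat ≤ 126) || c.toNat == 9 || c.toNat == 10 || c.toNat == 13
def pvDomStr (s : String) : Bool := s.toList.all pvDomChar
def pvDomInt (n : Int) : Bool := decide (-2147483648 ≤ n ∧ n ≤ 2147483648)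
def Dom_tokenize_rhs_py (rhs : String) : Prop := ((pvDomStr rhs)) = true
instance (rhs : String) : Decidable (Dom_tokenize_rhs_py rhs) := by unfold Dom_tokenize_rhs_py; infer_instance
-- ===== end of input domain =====

-- B replaces A's fused char-accumulator scan by a segment-jumping slice loop; objective: alternative (same O(n) cost).

-- ===== PORT A =====
-- one loop step: 'ch in "+-"' is membership of a single char in the 2-char string, ported as the disjunction
def tokAStep (st : List String × List Char) (ch : Char) : List String × List Char :=
  if ch = '+' ∨ ch = '-' then
    let tokens :=
      if st.2 ≠ [] then
        let tok := PySem.Chars.strip st.2        -- "".join(cur).strip()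
        if tok ≠ [] then st.1 ++ [String.ofList tok] else st.1
      else st.1
    (tokens ++ [String.ofList [ch]], [])
  else (st.1, st.2 ++ [ch])

def tokenize_rhs_py (rhs : String) : List String :=
  let st := rhs.toList.foldl tokAStep ([], [])
  let tokens :=
    if st.2 ≠ [] then
      let tok := PySem.Chars.strip st.2
      if tok ≠ [] then st.1 ++ [String.ofList tok] else st.1
    else st.1
  tokens.filter (fun t => t ≠ "")

-- ===== PORT B =====
-- the while loop of Source B: rest shrinks past the next operator each turn.
-- 'next((k for k, ch in enumerate(rest) if ch in "+-"), len(rest))' is the first index of '+'/'-'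
-- (default len(rest)), which is exactly List.findIdx; 'rest[:stop]' with 0 ≤ stop ≤ len is List.take stop.
def tokBGo (tokens : List String) (rest : List Char) : List String :=
  if hr : rest = [] then tokens
  else
    let stop := rest.findIdx (fun c => c = '+' || c = '-')
    let piece := PySem.Chars.strip (rest.take stop)
    let tokens1 := if piece ≠ [] then tokens ++ [String.ofList piece] else tokens
    let tokens2 := if h : stop < rest.length then tokens1 ++ [String.ofList [rest[stop]]] else tokens1
    tokBGo tokens2 (rest.drop (stop + 1))
termination_by rest.length
decreasing_by
  have : 0 < rest.length := List.length_pos_iff.mpr hr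
  simp [List.length_drop]; omega

def tokenize_rhs_py_alt (rhs : String) : List String := tokBGo [] rhs.toList

-- ===== PRECONDITION & SPEC =====
def Spec_tokenize_rhs_py (rhs : String) (out : List String) : Prop := out = tokenize_rhs_py_alt rhs
instance (rhs : String) (out : List String) : Decidable (Spec_tokenize_rhs_py rhs out) := by unfold Spec_tokenize_rhs_py; infer_instance

-- ===== CLAIM (what is proved, stated in full; the proofs are below) =====
def Claim_equal_tokenize_rhs_py : Prop := ∀ (rhs : String), Dom_tokenize_rhs_py rhs → Spec_tokenize_rhs_py rhs (tokenize_rhs_py rhs)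

-- ===== LEMMAS AND PROOFS =====

-- A's flush of the pending accumulator (the duplicated 'if cur:' block), as one function
def flushA (tokens : List String) (cur : List Char) : List String :=
  if cur ≠ [] then
    let tok := PySem.Chars.strip cur
    if tok ≠ [] then tokens ++ [String.ofList tok] else tokens
  else tokens

theorem flushA_eq (tokens : List String) (cur : List Char) :
    flushA tokens cur =
      if PySem.Chars.strip cur ≠ [] then tokens ++ [String.ofList (PySem.Chars.strip cur)] else tokens := by
  by_cases hc : cur = []
  · subst hc; simp [flushA, PySem.Chars.strip, PySem.Chars.lstrip, PySem.Chars.rstrip]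
  · simp [flushA, hc]

theorem opfree_findIdx_append (cur l : List Char)
    (h : ∀ c ∈ cur, ¬(c = '+' ∨ c = '-')) :
    (cur ++ l).findIdx (fun c => c = '+' || c = '-') =
      cur.length + l.findIdx (fun c => c = '+' || c = '-') := by
  induction cur with
  | nil => simp
  | cons c cs ih =>
      have hc := h c (by simp)
      have hcs : ∀ x ∈ cs, ¬(x = '+' ∨ x = '-') := fun x hx => h x (by simp [hx])
      simp only [List.cons_append, List.findIdx_cons]
      have : (decide (c = '+') || decide (c = '-')) = false := by
        simp at hc; simp [hc.1, hc.2]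
      simp [this, ih hcs]; omega

theorem tokBGo_loop (rest : List Char) : ∀ (tokens : List String) (cur : List Char),
    (∀ c ∈ cur, ¬(c = '+' ∨ c = '-')) →
    flushA (List.foldl tokAStep (tokens, cur) rest).1 (List.foldl tokAStep (tokens, cur) rest).2
      = tokBGo tokens (cur ++ rest) := by
  induction rest with
  | nil =>
      intro tokens cur hcur
      by_cases hc : cur = []
      · subst hc
        simp [flushA, tokBGo]
      · rw [tokBGo]
        have hfind : cur.findIdx (fun c => c = '+' || c = '-') = cur.length := by
          have := opfree_findIdx_append cur [] hcur
          simpa using this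
        simp only [List.append_nil, List.foldl_nil, dif_neg hc, hfind]
        rw [flushA_eq]
        simp [tokBGo]
  | cons c cs ih =>
      intro tokens cur hcur
      by_cases hop : c = '+' ∨ c = '-'
      · -- operator: A flushes and emits c; B's findIdx lands exactly on c
        have hstep : tokAStep (tokens, cur) c = (flushA tokens cur ++ [String.ofList [c]], []) := by
          simp [tokAStep, hop, flushA]
        have hne : cur ++ c :: cs ≠ [] := by simp
        rw [List.foldl_cons, hstep, ih _ [] (by simp)]
        conv_rhs => rw [tokBGo]
        rw [dif_neg hne]
        have hfind : (cur ++ c :: cs).findIdx (fun c => c = '+' || c = '-') = cur.length := by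
          rw [opfree_findIdx_append cur _ hcur]
          have : (c :: cs).findIdx (fun c => c = '+' || c = '-') = 0 := by
            rcases hop with h | h <;> simp [List.findIdx_cons, h]
          simp [this]
        have htake : (cur ++ c :: cs).take cur.length = cur := by
          simp
        have hlt : cur.length < (cur ++ c :: cs).length := by simp
        have hget : (cur ++ c :: cs)[cur.length]'hlt = c := by
          simp [List.getElem_append_right]
        have hdrop : (cur ++ c :: cs).drop (cur.length + 1) = cs := by
          have : cur ++ c :: cs = (cur ++ [c]) ++ cs := by simp
          rw [this]
          have hlen : cur.length + 1 = (cur ++ [c]).length := by simp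
          rw [hlen, List.drop_left]
        simp only [hfind, htake, hdrop, hget, dif_pos hlt]
        rw [flushA_eq, List.nil_append]
      · -- ordinary character: it joins the accumulator / the pending segment
        have hstep : tokAStep (tokens, cur) c = (tokens, cur ++ [c]) := by
          simp [tokAStep, hop]
        have hcur' : ∀ x ∈ cur ++ [c], ¬(x = '+' ∨ x = '-') := by
          intro x hx
          rcases List.mem_append.mp hx with h | h
          · exact hcur x h
          · simp at h; subst h; exact hop
        rw [List.foldl_cons, hstep, ih _ (cur ++ [c]) hcur']
        simp

theorem mk_toList (p : List Char) : (String.ofList p).toList = p := by simp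

theorem mk_ne_empty (p : List Char) (hp : p ≠ []) : String.ofList p ≠ "" := by
  intro h
  have h2 := congrArg String.toList h
  rw [mk_toList] at h2
  simp at h2
  exact hp h2

theorem tokBGo_nonempty (n : Nat) : ∀ (rest : List Char), rest.length ≤ n →
    ∀ (tokens : List String), (∀ t ∈ tokens, t ≠ "") → ∀ t ∈ tokBGo tokens rest, t ≠ "" := by
  induction n with
  | zero =>
      intro rest hlen tokens h
      have : rest = [] := by
        cases rest with
        | nil => rfl
        | cons a l => simp at hlen
      subst this
      rw [tokBGo]; simpa using h
  | succ n ih =>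
      intro rest hlen tokens h
      by_cases hr : rest = []
      · subst hr; rw [tokBGo]; simpa using h
      · rw [tokBGo, dif_neg hr]
        simp only []
        apply ih
        · have hpos : 0 < rest.length := List.length_pos_iff.mpr hr
          simp only [List.length_drop]
          omega
        · -- every token added this turn is a nonempty string
          intro t ht
          split at ht
          · rcases List.mem_append.mp ht with h1 | h1
            · split at h1
              · rcases List.mem_append.mp h1 with h2 | h2
                · exact h t h2
                · simp at h2; subst h2
                  rename_i hp
                  exact mk_ne_empty _ hp
              · exact h t h1
            · simp at h1; subst h1
              exact mk_ne_empty _ (by simp)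
          · split at ht
            · rcases List.mem_append.mp ht with h2 | h2
              · exact h t h2
              · simp at h2; subst h2
                rename_i hp
                exact mk_ne_empty _ hp
            · exact h t ht

-- ===== VERDICT (by name: the statement is the Claim_ definition above) =====
theorem tokenize_rhs_py_spec : Claim_equal_tokenize_rhs_py := by
  intro rhs _
  unfold Spec_tokenize_rhs_py tokenize_rhs_py tokenize_rhs_py_alt
  have hloop := tokBGo_loop rhs.toList [] [] (by simp)
  simp only [List.nil_append] at hloop
  have hflush :
      (if (rhs.toList.foldl tokAStep ([], [])).2 ≠ [] then
        let tok := PySem.Chars.strip (rhs.toList.foldl tokAStep ([], [])).2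
        if tok ≠ [] then (rhs.toList.foldl tokAStep ([], [])).1 ++ [String.ofList tok]
        else (rhs.toList.foldl tokAStep ([], [])).1
       else (rhs.toList.foldl tokAStep ([], [])).1) = tokBGo [] rhs.toList := by
    rw [← hloop]; rfl
  simp only [hflush]
  rw [List.filter_eq_self.mpr]
  intro t ht
  have := tokBGo_nonempty rhs.toList.length rhs.toList le_rfl [] (by simp) t ht
  simpa using this
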